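-- pv_equiv track=rewrite | github.com/Kawser-nerd/CLCDSA | Source Codes/AtCoder/abc017/D/2764086.py | solve
-- ===== SOURCE A (Python) =====
-- from collections import deque
--
-- MOD = 1000000007
--
-- def solve(fs, m):
--     queue = deque([(1, 0), (1, fs[0])])
--     flavorSet = {0, fs[0]}
--     ans = 1
--     for f in fs[1:]:
--         ans = ans * 2
--         if f in flavorSet:
--             while f in flavorSet:
--                 point, f0 = queue.popleft()
--                 if f0 != f:
--                     ans -= point
--                 else:
--                     queue.appendleft((point, 0))
--                     flavorSet.add(0)
--                 flavorSet.remove(f0)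
--         ans %= MOD
--         queue.append((ans, f))
--         flavorSet.add(f)
--     return ans
-- ===== SOURCE B (Python) =====
-- MOD = 1000000007
--
-- def solve(fs, m):
--     # Prefix-sum sliding-window DP: dp[i] = number of ways for the first i
--     # cards; dp[i] = sum(dp[left..i-1]) over the maximal window in which
--     # flavors are distinct, maintained with a dict of last positions.
--     S = [1]          # S[i] = (dp[0] + ... + dp[i]) % MOD
--     last = {}        # flavor -> most recent 1-based position
--     left = 0
--     dp = 1
--     i = 0
--     for f in fs:
--         i += 1
--         p = last.get(f, 0)
--         if p > left:
--             left = p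
--         dp = (S[i - 1] - (S[left - 1] if left > 0 else 0)) % MOD
--         S.append((S[i - 1] + dp) % MOD)
--         last[f] = i
--     return dp
-- ===== Notes on version B (the rewrite author's own statement) =====
-- stated objective: simpler
-- what changed: Replaces A's deque-plus-flavor-set window maintenance (popping expired bundle entries and re-inserting a sentinel) by the standard prefix-sum DP: a running prefix-sum list, a dict of last positions and a moving left pointer, so no inner pop loop exists at all.
-- outside the precondition, e.g. on solve([0, 0], 0): A returns 2, B returns 1; on solve([0, 1, 1], 0): A raises KeyError, B returns 2; on solve([], 0): A raises IndexError, B returns 1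
import Mathlib
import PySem

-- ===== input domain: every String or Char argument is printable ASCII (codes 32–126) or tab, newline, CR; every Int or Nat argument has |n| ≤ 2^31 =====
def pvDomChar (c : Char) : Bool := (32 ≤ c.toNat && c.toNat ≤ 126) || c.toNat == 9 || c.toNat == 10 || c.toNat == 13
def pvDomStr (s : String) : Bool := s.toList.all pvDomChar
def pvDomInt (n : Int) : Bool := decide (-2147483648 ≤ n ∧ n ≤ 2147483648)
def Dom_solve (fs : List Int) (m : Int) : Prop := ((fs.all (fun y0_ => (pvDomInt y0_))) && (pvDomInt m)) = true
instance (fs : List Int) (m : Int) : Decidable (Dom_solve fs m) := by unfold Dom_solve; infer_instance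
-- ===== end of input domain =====

-- B replaces A's deque+flavor-set window maintenance by the standard prefix-sum DP
-- (prefix sums, dict of last positions, moving left pointer): simpler, no inner pop loop.
-- A raises on [] (IndexError) and collides its sentinel flavor 0 with real flavor 0
-- (KeyError or accidental values), so Pre_ excludes those inputs.

def pvMOD : Int := 1000000007

-- ===== PORT A =====
-- inner 'while f in flavorSet' loop. fuel only makes the recursion total; on every
-- input Pre_ admits the loop exits before fuel runs out (fuel = queue.length + 1 suffices).
-- Set.discard coincides with Python's set.remove wherever Python does not raise KeyError;
-- the inputs where it would raise are outside Pre_.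
def solveWhile (f : Int) (fuel : Nat) (queue : List (Int × Int)) (fset : PySem.Set Int)
    (ans : Int) : List (Int × Int) × PySem.Set Int × Int :=
  match fuel with
  | 0 => (queue, fset, ans)
  | fuel + 1 =>
    if PySem.Set.contains fset f then
      match queue with
      | [] => (queue, fset, ans)  -- queue.popleft() on empty deque: IndexError, outside Pre_
      | (point, f0) :: rest =>
        if f0 ≠ f then
          solveWhile f fuel rest (PySem.Set.discard fset f0) (ans - point)
        else
          solveWhile f fuel ((point, 0) :: rest)
            (PySem.Set.discard (PySem.Set.add fset 0) f0) ans
    else (queue, fset, ans)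

-- one iteration of A's 'for f in fs[1:]' loop
def astep (st : List (Int × Int) × PySem.Set Int × Int) (f : Int) :
    List (Int × Int) × PySem.Set Int × Int :=
  let a := st.2.2 * 2
  let st1 := if PySem.Set.contains st.2.1 f then solveWhile f (st.1.length + 1) st.1 st.2.1 a
             else (st.1, st.2.1, a)
  let a2 := PySem.Int.mod st1.2.2 pvMOD
  (st1.1 ++ [(a2, f)], PySem.Set.add st1.2.1 f, a2)

def solve (fs : List Int) (m : Int) : Int :=
  match PySem.List.pyGet? fs 0 with
  | none => 0  -- fs[0] on empty list: IndexError, outside Pre_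
  | some f0 =>
    ((PySem.List.slice fs (some 1) none).foldl astep
      ([(1, 0), (1, f0)], PySem.Set.ofList [0, f0], 1)).2.2

-- ===== PORT B =====
-- one iteration of B's 'for f in fs' loop; state = (S, last, left, dp, i)
def bstep (st : List Int × PySem.Dict Int Int × Int × Int × Int) (f : Int) :
    List Int × PySem.Dict Int Int × Int × Int × Int :=
  let S := st.1
  let last := st.2.1
  let left := st.2.2.1
  let i := st.2.2.2.2 + 1
  let p := PySem.Dict.getD last f 0
  let left2 := if p > left then p else left
  let dp := PySem.Int.mod (PySem.List.pyGetD S (i - 1) 0 -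
              (if left2 > 0 then PySem.List.pyGetD S (left2 - 1) 0 else 0)) pvMOD
  (S ++ [PySem.Int.mod (PySem.List.pyGetD S (i - 1) 0 + dp) pvMOD],
   PySem.Dict.insert last f i, left2, dp, i)

def solve_alt (fs : List Int) (m : Int) : Int :=
  (fs.foldl bstep ([1], PySem.Dict.empty, 0, 1, 0)).2.2.2.1

-- ===== PRECONDITION & SPEC =====
-- Pre_ excludes the empty list (fs[0] raises IndexError) and lists containing flavor 0:
-- 0 is A's internal sentinel (the problem's flavors are positive), and a real flavor 0
-- collides with it, making A raise KeyError or return an accidental value.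
def Pre_solve (fs : List Int) (m : Int) : Prop := fs ≠ [] ∧ (0 : Int) ∉ fs
instance (fs : List Int) (m : Int) : Decidable (Pre_solve fs m) := by
  unfold Pre_solve; infer_instance
def pvWitness_solve : List Int × Int := ([2, 3, 2, 1], 5)

def Spec_solve (fs : List Int) (m : Int) (out : Int) : Prop := out = solve_alt fs m
instance (fs : List Int) (m : Int) (out : Int) : Decidable (Spec_solve fs m out) := by
  unfold Spec_solve; infer_instance

-- ===== CLAIM (what is proved, stated in full; the proofs are below) =====
def Claim_equal_solve : Prop :=
  ∀ (fs : List Int) (m : Int), Dom_solve fs m → Pre_solve fs m → Spec_solve fs m (solve fs m)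

-- ===== LEMMAS AND PROOFS =====

-- 1-based position of the last occurrence of f in l (none if absent)
def lastOcc (l : List Int) (f : Int) : Option Nat :=
  match l with
  | [] => none
  | x :: t =>
    match lastOcc t f with
    | some q => some (q + 1)
    | none => if x = f then some 1 else none

-- sum of the first j dp-values
def Tsum (dv : List Int) (j : Nat) : Int := (dv.take j).sum

-- the coupling invariant after processing prefix pre (nonempty):
-- dv!j   = dp value of prefix length j (as both programs store it, already reduced),
-- S      = B's prefix-sum list, last = B's dict, lft = B's left pointer (as a Nat),
-- queue/fset/ans = A's loop state.
def DPInv (pre dv S : List Int) (last : PySem.Dict Int Int) (lft : Nat)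
    (queue : List (Int × Int)) (fset : PySem.Set Int) (ans : Int) : Prop :=
  dv.length = pre.length + 1 ∧
  S.length = pre.length + 1 ∧
  (∀ j : Nat, j ≤ pre.length → Int.ModEq pvMOD (S.getD j 0) (Tsum dv (j + 1))) ∧
  ans = dv.getD pre.length 0 ∧
  Int.ModEq pvMOD ans (Tsum dv pre.length - Tsum dv lft) ∧
  lft < pre.length ∧
  queue = (dv.getD lft 0, 0) ::
    (List.range (pre.length - lft)).map
      (fun k => (dv.getD (lft + k + 1) 0, pre.getD (lft + k) 0)) ∧
  (∀ x : Int, x ∈ fset ↔ x = 0 ∨ x ∈ pre.drop lft) ∧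
  (pre.drop lft).Nodup ∧
  (∀ g : Int, PySem.Dict.get? last g = (lastOcc pre g).map (fun q => (q : Int)))

lemma lastOcc_append_self (l : List Int) (f : Int) :
    lastOcc (l ++ [f]) f = some (l.length + 1) := by
  induction l with
  | nil => simp [lastOcc]
  | cons x t ih => simp [lastOcc, ih]

lemma lastOcc_append_ne (l : List Int) (f g : Int) (h : g ≠ f) :
    lastOcc (l ++ [g]) f = lastOcc l f := by
  induction l with
  | nil => simp [lastOcc, h]
  | cons x t ih => simp [lastOcc, ih]

lemma lastOcc_eq_none (l : List Int) (f : Int) : lastOcc l f = none ↔ f ∉ l := by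
  induction l with
  | nil => simp [lastOcc]
  | cons x t ih =>
    simp only [lastOcc]
    rcases hq : lastOcc t f with _ | q
    · rw [hq] at ih; simp only [List.mem_cons]
      constructor
      · intro h hx
        rcases hx with hx | hx
        · subst hx; simp at h
        · exact (ih.mp rfl) hx
      · intro h
        have : ¬ x = f := fun hxf => h (Or.inl hxf.symm)
        simp [this]
    · simp only [List.mem_cons]
      constructor
      · intro h; cases h
      · intro h
        exfalso
        have : f ∈ t := by
          by_contra hf
          have := ih.mpr hf
          rw [hq] at this; cases this
        exact h (Or.inr this)

lemma lastOcc_spec (l : List Int) (f : Int) (q : Nat) (h : lastOcc l f = some q) :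
    1 ≤ q ∧ q ≤ l.length ∧ l.getD (q - 1) 0 = f ∧ f ∉ l.drop q := by
  induction l generalizing q with
  | nil => simp [lastOcc] at h
  | cons x t ih =>
    simp only [lastOcc] at h
    rcases hq : lastOcc t f with _ | q'
    · rw [hq] at h
      by_cases hx : x = f
      · simp [hx] at h
        have h1 : q = 1 := h.symm
        subst h1
        refine ⟨by omega, by simp, by simpa using hx, ?_⟩
        have : f ∉ t := (lastOcc_eq_none t f).mp hq
        simpa using this
      · simp [hx] at h
    · rw [hq] at h
      simp at h
      obtain ⟨h1, h2, h3, h4⟩ := ih q' hq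
      subst h
      refine ⟨by omega, by simp; omega, ?_, ?_⟩
      · have : q' + 1 - 1 = (q' - 1) + 1 := by omega
        rw [this]
        simpa using h3
      · simpa using h4

lemma getD_append_lt {α : Type} (l : List α) (a d : α) (j : Nat) (h : j < l.length) :
    (l ++ [a]).getD j d = l.getD j d := by
  simp [List.getD, List.getElem?_append_left h]

lemma getD_append_len {α : Type} (l : List α) (a d : α) :
    (l ++ [a]).getD l.length d = a := by
  simp [List.getD]

lemma Tsum_succ (dv : List Int) (j : Nat) (h : j < dv.length) :
    Tsum dv (j + 1) = Tsum dv j + dv.getD j 0 := by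
  unfold Tsum
  rw [List.take_add_one, List.sum_append]
  simp [List.getD, List.getElem?_eq_getElem h]

lemma Tsum_append (dv : List Int) (a : Int) (j : Nat) (h : j ≤ dv.length) :
    Tsum (dv ++ [a]) j = Tsum dv j := by
  unfold Tsum
  rw [List.take_append_of_le_length h]

-- the pop loop, phase 2: sentinel already removed, head carries flavor pre!c
lemma getD_mem_drop (l : List Int) (c p : Nat) (hcp : c ≤ p) (hp : p < l.length) :
    l.getD p 0 ∈ l.drop c := by
  rw [List.getD_eq_getElem l 0 hp]
  have h2 : p - c < (l.drop c).length := by simp; omega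
  have : l[p] = (l.drop c)[p - c] := by
    rw [List.getElem_drop]
    congr 1; omega
  rw [this]
  exact List.getElem_mem h2

lemma drop_eq_cons (l : List Int) (c : Nat) (h : c < l.length) :
    l.drop c = l.getD c 0 :: l.drop (c + 1) := by
  rw [List.getD_eq_getElem l 0 h]
  exact List.drop_eq_getElem_cons h

lemma whileMid (p0 : Nat) (pre dv : List Int) (f : Int)
    (hp : p0 < pre.length) (hdv : dv.length = pre.length + 1)
    (hf : pre.getD p0 0 = f) (hlast : f ∉ pre.drop (p0 + 1)) (hf0 : f ≠ 0) :
    ∀ (fuel c : Nat) (fset : PySem.Set Int) (ans : Int),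
    c ≤ p0 →
    (pre.drop c).Nodup →
    (∀ x : Int, x ∈ fset ↔ x ∈ pre.drop c) →
    p0 - c + 2 ≤ fuel →
    ∃ fset' : PySem.Set Int,
      solveWhile f fuel
        ((List.range (pre.length - c)).map
          (fun k => (dv.getD (c + k + 1) 0, pre.getD (c + k) 0))) fset ans
      = ((dv.getD (p0 + 1) 0, 0) ::
          (List.range (pre.length - (p0 + 1))).map
            (fun k => (dv.getD (p0 + 1 + k + 1) 0, pre.getD (p0 + 1 + k) 0)),
         fset', ans - (Tsum dv (p0 + 1) - Tsum dv (c + 1))) ∧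
        (∀ x : Int, x ∈ fset' ↔ x = 0 ∨ x ∈ pre.drop (p0 + 1)) := by
  intro fuel
  induction fuel with
  | zero => intro c fset ans hc _ _ hfuel; omega
  | succ fuel ih =>
    intro c fset ans hc hnd hfs hfuel
    have hcl : c < pre.length := by omega
    have hfin : f ∈ pre.drop c := hf ▸ getD_mem_drop pre c p0 hc hp
    have hcont : PySem.Set.contains fset f = true :=
      (PySem.Set.contains_iff fset f).mpr ((hfs f).mpr hfin)
    have hrange : pre.length - c = (pre.length - (c + 1)) + 1 := by omega
    have hqueue : (List.range (pre.length - c)).map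
          (fun k => (dv.getD (c + k + 1) 0, pre.getD (c + k) 0))
        = (dv.getD (c + 1) 0, pre.getD c 0) ::
          (List.range (pre.length - (c + 1))).map
            (fun k => (dv.getD (c + 1 + k + 1) 0, pre.getD (c + 1 + k) 0)) := by
      rw [hrange, List.range_succ_eq_map, List.map_cons, List.map_map]
      refine congrArg₂ List.cons (by norm_num) ?_
      refine List.map_congr_left (fun a _ => ?_)
      simp only [Function.comp_apply, Nat.succ_eq_add_one]
      have e1 : c + (a + 1) + 1 = c + 1 + a + 1 := by omega
      have e2 : c + (a + 1) = c + 1 + a := by omega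
      rw [e1, e2]
    have hdropc := drop_eq_cons pre c hcl
    rcases Nat.lt_or_ge c p0 with hlt | hge
    · -- head flavor ≠ f : pop it and recurse
      have hfin1 : f ∈ pre.drop (c + 1) := hf ▸ getD_mem_drop pre (c + 1) p0 (by omega) hp
      have hhead : pre.getD c 0 ≠ f := by
        intro he
        have : (pre.getD c 0) ∉ pre.drop (c + 1) := by
          rw [hdropc] at hnd
          exact (List.nodup_cons.mp hnd).1
        exact this (he ▸ hfin1)
      have hnd1 : (pre.drop (c + 1)).Nodup := by
        rw [hdropc] at hnd
        exact (List.nodup_cons.mp hnd).2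
      have hfs1 : ∀ x : Int, x ∈ PySem.Set.discard fset (pre.getD c 0) ↔
          x ∈ pre.drop (c + 1) := by
        intro x
        rw [PySem.Set.mem_discard, hfs x, hdropc]
        simp only [List.mem_cons]
        constructor
        · rintro ⟨hx | hx, hne⟩
          · exact absurd hx hne
          · exact hx
        · intro hx
          refine ⟨Or.inr hx, fun he => ?_⟩
          rw [hdropc] at hnd
          exact (List.nodup_cons.mp hnd).1 (he ▸ hx)
      obtain ⟨fset', heq, hmem⟩ := ih (c + 1) (PySem.Set.discard fset (pre.getD c 0))
        (ans - dv.getD (c + 1) 0) (by omega) hnd1 hfs1 (by omega)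
      refine ⟨fset', ?_, hmem⟩
      rw [hqueue]
      show solveWhile f (fuel + 1) _ fset ans = _
      rw [solveWhile]
      rw [if_pos hcont]
      have hTc : Tsum dv (c + 2) = Tsum dv (c + 1) + dv.getD (c + 1) 0 :=
        Tsum_succ dv (c + 1) (by omega)
      have harith : ans - dv.getD (c + 1) 0 - (Tsum dv (p0 + 1) - Tsum dv (c + 2))
          = ans - (Tsum dv (p0 + 1) - Tsum dv (c + 1)) := by rw [hTc]; ring
      show (if pre.getD c 0 ≠ f then _ else _) = _
      rw [if_pos hhead, heq, harith]
    · -- c = p0 : head flavor is f, swap in the sentinel, then the loop exits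
      have hceq : c = p0 := by omega
      subst hceq
      refine ⟨PySem.Set.discard (PySem.Set.add fset 0) f, ?_, ?_⟩
      · rw [hqueue]
        obtain ⟨fuel', rfl⟩ : ∃ k, fuel = k + 1 := ⟨fuel - 1, by omega⟩
        show solveWhile f (fuel' + 1 + 1) _ fset ans = _
        rw [solveWhile]
        rw [if_pos hcont]
        show (if pre.getD c 0 ≠ f then _ else _) = _
        rw [hf]
        rw [if_neg (by simp)]
        rw [solveWhile]
        have hnot : ¬ (PySem.Set.contains (PySem.Set.discard (PySem.Set.add fset 0) f) f
            = true) := by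
          rw [PySem.Set.contains_iff, PySem.Set.mem_discard]
          simp
        rw [if_neg hnot]
        have harith : ans = ans - (Tsum dv (c + 1) - Tsum dv (c + 1)) := by ring
        rw [← harith]
      · intro x
        rw [PySem.Set.mem_discard, PySem.Set.mem_add, hfs x, hdropc]
        simp only [List.mem_cons, hf]
        constructor
        · rintro ⟨(hx | hx) | hx, hne⟩
          · exact absurd hx hne
          · exact Or.inr hx
          · exact Or.inl hx
        · rintro (hx | hx)
          · exact ⟨Or.inr hx, hx ▸ hf0.symm⟩
          · exact ⟨Or.inl (Or.inr hx), fun he => hlast (he ▸ hx)⟩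

-- the pop loop, phase 1: with the sentinel (·, 0) at the head
lemma whileTop (fuel c p0 : Nat) (pre dv : List Int) (f : Int)
    (fset : PySem.Set Int) (ans : Int)
    (hc : c ≤ p0) (hp : p0 < pre.length) (hdv : dv.length = pre.length + 1)
    (hnd : (pre.drop c).Nodup)
    (hf : pre.getD p0 0 = f) (hlast : f ∉ pre.drop (p0 + 1)) (hf0 : f ≠ 0)
    (h0pre : (0 : Int) ∉ pre)
    (hfs : ∀ x : Int, x ∈ fset ↔ x = 0 ∨ x ∈ pre.drop c)
    (hfuel : p0 - c + 3 ≤ fuel) :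
    ∃ fset' : PySem.Set Int,
      solveWhile f fuel
        ((dv.getD c 0, 0) ::
          (List.range (pre.length - c)).map
            (fun k => (dv.getD (c + k + 1) 0, pre.getD (c + k) 0))) fset ans
      = ((dv.getD (p0 + 1) 0, 0) ::
          (List.range (pre.length - (p0 + 1))).map
            (fun k => (dv.getD (p0 + 1 + k + 1) 0, pre.getD (p0 + 1 + k) 0)),
         fset', ans - (Tsum dv (p0 + 1) - Tsum dv c)) ∧
        (∀ x : Int, x ∈ fset' ↔ x = 0 ∨ x ∈ pre.drop (p0 + 1)) := by
  have hfin : f ∈ pre.drop c := hf ▸ getD_mem_drop pre c p0 hc hp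
  have hcont : PySem.Set.contains fset f = true :=
    (PySem.Set.contains_iff fset f).mpr ((hfs f).mpr (Or.inr hfin))
  obtain ⟨fuel', rfl⟩ : ∃ k, fuel = k + 1 := ⟨fuel - 1, by omega⟩
  have hfs1 : ∀ x : Int, x ∈ PySem.Set.discard fset 0 ↔ x ∈ pre.drop c := by
    intro x
    rw [PySem.Set.mem_discard, hfs x]
    constructor
    · rintro ⟨hx | hx, hne⟩
      · exact absurd hx hne
      · exact hx
    · intro hx
      exact ⟨Or.inr hx, fun he => h0pre (List.mem_of_mem_drop (he ▸ hx))⟩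
  obtain ⟨fset', heq, hmem⟩ := whileMid p0 pre dv f hp hdv hf hlast hf0 fuel' c
    (PySem.Set.discard fset 0) (ans - dv.getD c 0) hc hnd hfs1 (by omega)
  refine ⟨fset', ?_, hmem⟩
  rw [solveWhile]
  rw [if_pos hcont]
  show (if (0 : Int) ≠ f then _ else _) = _
  rw [if_pos (Ne.symm hf0), heq]
  have hTc : Tsum dv (c + 1) = Tsum dv c + dv.getD c 0 := Tsum_succ dv c (by omega)
  have harith : ans - dv.getD c 0 - (Tsum dv (p0 + 1) - Tsum dv (c + 1))
      = ans - (Tsum dv (p0 + 1) - Tsum dv c) := by rw [hTc]; ring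
  rw [harith]

-- extending the invariant by one processed element
lemma dpinv_extend (pre dv S : List Int) (last : PySem.Dict Int Int) (lft' : Nat)
    (f v : Int) (queue' : List (Int × Int)) (fset' : PySem.Set Int)
    (hdv : dv.length = pre.length + 1) (hS : S.length = pre.length + 1)
    (hSmod : ∀ j : Nat, j ≤ pre.length → Int.ModEq pvMOD (S.getD j 0) (Tsum dv (j + 1)))
    (hlastd : ∀ g : Int, PySem.Dict.get? last g = (lastOcc pre g).map (fun q => (q : Int)))
    (hlft' : lft' ≤ pre.length)
    (hv : Int.ModEq pvMOD v (Tsum dv (pre.length + 1) - Tsum dv lft'))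
    (hnd' : (pre.drop lft').Nodup) (hfnotin : f ∉ pre.drop lft') (hf0 : f ≠ 0)
    (hqueue' : queue' = ((dv ++ [v]).getD lft' 0, 0) ::
      (List.range (pre.length + 1 - lft')).map
        (fun k => ((dv ++ [v]).getD (lft' + k + 1) 0, (pre ++ [f]).getD (lft' + k) 0)))
    (hfset' : ∀ x : Int, x ∈ fset' ↔ x = 0 ∨ x ∈ (pre ++ [f]).drop lft') :
    DPInv (pre ++ [f]) (dv ++ [v]) (S ++ [PySem.Int.mod (S.getD pre.length 0 + v) pvMOD])
      (PySem.Dict.insert last f ((pre.length : Int) + 1)) lft' queue' fset' v := by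
  have hM : (0 : Int) < pvMOD := by norm_num [pvMOD]
  have hdrop : (pre ++ [f]).drop lft' = pre.drop lft' ++ [f] :=
    List.drop_append_of_le_length hlft'
  refine ⟨by simp [hdv], by simp [hS], ?_, ?_, ?_, by simp; omega, by simpa using hqueue', hfset', ?_, ?_⟩
  · -- prefix sums mod
    intro j hj
    simp only [List.length_append, List.length_cons, List.length_nil] at hj
    rcases Nat.lt_or_ge j (pre.length + 1) with hlt | hge
    · rw [getD_append_lt S _ 0 j (by omega), Tsum_append dv v (j + 1) (by omega)]
      exact hSmod j (by omega)
    · have hj' : j = pre.length + 1 := by omega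
      subst hj'
      have hSl : S.length = pre.length + 1 := hS
      have : (S ++ [PySem.Int.mod (S.getD pre.length 0 + v) pvMOD]).getD (pre.length + 1) 0
          = PySem.Int.mod (S.getD pre.length 0 + v) pvMOD := by
        rw [← hSl]
        exact getD_append_len S _ 0
      rw [this, PySem.Int.mod_eq_emod_of_pos hM]
      have h1 : Int.ModEq pvMOD ((S.getD pre.length 0 + v) % pvMOD)
          (S.getD pre.length 0 + v) := Int.emod_emod_of_dvd _ dvd_rfl
      refine h1.trans ?_
      have h2 : Int.ModEq pvMOD (S.getD pre.length 0 + v)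
          (Tsum dv (pre.length + 1) + v) :=
        Int.ModEq.add (hSmod pre.length (le_refl _)) (Int.ModEq.refl v)
      refine h2.trans ?_
      have h3 : Tsum (dv ++ [v]) (pre.length + 2)
          = Tsum (dv ++ [v]) (pre.length + 1) + v := by
        have := Tsum_succ (dv ++ [v]) (pre.length + 1) (by simp [hdv])
        rw [this]
        congr 1
        rw [← hdv]
        exact getD_append_len dv v 0
      rw [h3, Tsum_append dv v (pre.length + 1) (by omega)]
  · -- final value is the last dp
    have : (pre ++ [f]).length = pre.length + 1 := by simp
    rw [this, ← hdv]
    exact (getD_append_len dv v 0).symm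
  · -- window congruence
    have h1 : Tsum (dv ++ [v]) (pre ++ [f]).length = Tsum dv (pre.length + 1) := by
      simp only [List.length_append, List.length_cons, List.length_nil]
      exact Tsum_append dv v (pre.length + 1) (by omega)
    have h2 : Tsum (dv ++ [v]) lft' = Tsum dv lft' :=
      Tsum_append dv v lft' (by omega)
    rw [h1, h2]
    exact hv
  · -- window distinct
    rw [hdrop]
    simp only [List.nodup_append, List.nodup_cons, List.nodup_nil]
    refine ⟨hnd', ⟨by simp, trivial⟩, ?_⟩
    intro a ha b hb
    rw [List.mem_singleton] at hb
    subst hb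
    exact fun he => hfnotin (he ▸ ha)
  · -- last-occurrence dict
    intro g
    by_cases hg : g = f
    · subst hg
      rw [PySem.Dict.get?_insert_self, lastOcc_append_self]
      simp
    · rw [PySem.Dict.get?_insert_of_ne _ _ hg, lastOcc_append_ne pre g f (Ne.symm hg), hlastd g]

-- appending the new (dp, flavor) entry keeps the queue in canonical shape
lemma queue_extend (pre dv : List Int) (f v : Int) (c : Nat) (hc : c ≤ pre.length)
    (hdv : dv.length = pre.length + 1) :
    ((dv.getD c 0, 0) :: (List.range (pre.length - c)).map
        (fun k => (dv.getD (c + k + 1) 0, pre.getD (c + k) 0))) ++ [(v, f)]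
    = ((dv ++ [v]).getD c 0, 0) :: (List.range (pre.length + 1 - c)).map
        (fun k => ((dv ++ [v]).getD (c + k + 1) 0, (pre ++ [f]).getD (c + k) 0)) := by
  rw [List.cons_append]
  refine congrArg₂ List.cons ?_ ?_
  · rw [getD_append_lt dv v 0 c (by omega)]
  · rw [show pre.length + 1 - c = (pre.length - c) + 1 from by omega,
      List.range_succ, List.map_append]
    refine congrArg₂ (· ++ ·) ?_ ?_
    · refine List.map_congr_left (fun k hk => ?_)
      rw [List.mem_range] at hk
      rw [getD_append_lt dv v 0 (c + k + 1) (by omega),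
        getD_append_lt pre f 0 (c + k) (by omega)]
    · simp only [List.map_cons, List.map_nil]
      refine congrArg₂ List.cons ?_ rfl
      refine congrArg₂ Prod.mk ?_ ?_
      · rw [show c + (pre.length - c) + 1 = dv.length from by omega]
        exact (getD_append_len dv v 0).symm
      · rw [show c + (pre.length - c) = pre.length from by omega]
        exact (getD_append_len pre f 0).symm

-- evaluation lemmas for the two step functions
lemma bstep_eval (S : List Int) (last : PySem.Dict Int Int) (left ans ii pval : Int)
    (f : Int) (hp : PySem.Dict.getD last f 0 = pval) :
    bstep (S, last, left, ans, ii) f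
    = (S ++ [PySem.Int.mod (PySem.List.pyGetD S (ii + 1 - 1) 0 +
          PySem.Int.mod (PySem.List.pyGetD S (ii + 1 - 1) 0 -
            (if (if pval > left then pval else left) > 0
             then PySem.List.pyGetD S ((if pval > left then pval else left) - 1) 0
             else 0)) pvMOD) pvMOD],
       PySem.Dict.insert last f (ii + 1),
       (if pval > left then pval else left),
       PySem.Int.mod (PySem.List.pyGetD S (ii + 1 - 1) 0 -
         (if (if pval > left then pval else left) > 0
          then PySem.List.pyGetD S ((if pval > left then pval else left) - 1) 0
          else 0)) pvMOD,
       ii + 1) := by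
  subst hp; rfl

lemma astep_eval_pos (queue : List (Int × Int)) (fset : PySem.Set Int) (ans f : Int)
    (h : PySem.Set.contains fset f = true) :
    astep (queue, fset, ans) f
    = ((solveWhile f (queue.length + 1) queue fset (ans * 2)).1 ++
        [(PySem.Int.mod (solveWhile f (queue.length + 1) queue fset (ans * 2)).2.2 pvMOD, f)],
       PySem.Set.add (solveWhile f (queue.length + 1) queue fset (ans * 2)).2.1 f,
       PySem.Int.mod (solveWhile f (queue.length + 1) queue fset (ans * 2)).2.2 pvMOD) := by
  simp only [astep]
  rw [if_pos h]

lemma astep_eval_neg (queue : List (Int × Int)) (fset : PySem.Set Int) (ans f : Int)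
    (h : ¬ PySem.Set.contains fset f = true) :
    astep (queue, fset, ans) f
    = (queue ++ [(PySem.Int.mod (ans * 2) pvMOD, f)], PySem.Set.add fset f,
       PySem.Int.mod (ans * 2) pvMOD) := by
  simp only [astep]
  rw [if_neg h]

-- the main coupled loop
lemma loop_eq (suf : List Int) : ∀ (pre dv S : List Int) (last : PySem.Dict Int Int)
    (lft : Nat) (queue : List (Int × Int)) (fset : PySem.Set Int) (ans : Int),
    (0 : Int) ∉ pre → (0 : Int) ∉ suf →
    DPInv pre dv S last lft queue fset ans →
    (suf.foldl astep (queue, fset, ans)).2.2 =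
    (suf.foldl bstep (S, last, (lft : Int), ans, (pre.length : Int))).2.2.2.1 := by
  induction suf with
  | nil => intro pre dv S last lft queue fset ans _ _ _; rfl
  | cons f suf ih =>
    intro pre dv S last lft queue fset ans h0pre h0suf hInv
    obtain ⟨hdv, hS, hSmod, hans, hwin, hlft, hqueue, hfset, hnd, hlastd⟩ := hInv
    have hf0 : f ≠ 0 := by intro h; exact h0suf (by simp [h])
    have h0suf' : (0 : Int) ∉ suf := fun h => h0suf (List.mem_cons_of_mem f h)
    have h0pre2 : (0 : Int) ∉ pre ++ [f] := by
      simp only [List.mem_append, List.mem_singleton]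
      rintro (h | h)
      · exact h0pre h
      · exact hf0 h.symm
    have hM : (0 : Int) < pvMOD := by norm_num [pvMOD]
    have hTi1 : Tsum dv (pre.length + 1) = Tsum dv pre.length + ans := by
      rw [Tsum_succ dv pre.length (by omega), hans]
    have hii : ((pre.length : Int) + 1 - 1) = ((pre.length : Nat) : Int) := by ring
    have hlen2 : ((pre ++ [f]).length : Int) = (pre.length : Int) + 1 := by
      simp
    simp only [List.foldl_cons]
    by_cases hfw : f ∈ pre.drop lft
    · -- CASE A: f occurs in the current window
      have hfpre : f ∈ pre := List.mem_of_mem_drop hfw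
      obtain ⟨q, hq⟩ : ∃ q, lastOcc pre f = some q := by
        cases hqq : lastOcc pre f with
        | none => exact absurd ((lastOcc_eq_none pre f).mp hqq) (by simpa using hfpre)
        | some q => exact ⟨q, rfl⟩
      obtain ⟨hq1, hqlen, hqget, hqdrop⟩ := lastOcc_spec pre f q hq
      set p0 := q - 1 with hp0def
      have hlftp0 : lft ≤ p0 := by
        by_contra hcon
        obtain ⟨k, hk, hkeq⟩ := List.getElem_of_mem hfw
        have hkl : k < pre.length - lft := by simpa using hk
        have hgd : pre.getD (lft + k) 0 = f := by
          rw [List.getD_eq_getElem pre 0 (by omega)]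
          rw [List.getElem_drop] at hkeq
          exact hkeq
        exact hqdrop (hgd ▸ getD_mem_drop pre q (lft + k) (by omega) (by omega))
      have hp0i : p0 < pre.length := by omega
      have hqgetD : pre.getD p0 0 = f := hqget
      have hqdrop' : f ∉ pre.drop (p0 + 1) := by
        rwa [show p0 + 1 = q from by omega]
      -- B side
      have hpval : PySem.Dict.getD last f 0 = ((q : Nat) : Int) := by
        rw [PySem.Dict.getD_eq_get?_getD, hlastd f, hq]
        rfl
      have hb := bstep_eval S last (lft : Int) ans (pre.length : Int) ((q : Nat) : Int)
        f hpval
      rw [if_pos (show ((q : Nat) : Int) > (lft : Int) from by omega)] at hb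
      rw [if_pos (show ((q : Nat) : Int) > 0 from by omega)] at hb
      rw [hii, PySem.List.pyGetD_natCast] at hb
      rw [show ((q : Nat) : Int) - 1 = ((p0 : Nat) : Int) from by omega] at hb
      rw [PySem.List.pyGetD_natCast] at hb
      -- A side
      have hcontQ : PySem.Set.contains fset f = true :=
        (PySem.Set.contains_iff fset f).mpr ((hfset f).mpr (Or.inr hfw))
      have hqlen2 : queue.length = pre.length - lft + 1 := by rw [hqueue]; simp
      obtain ⟨fset', hwt, hmem'⟩ := whileTop (pre.length - lft + 1 + 1) lft p0 pre dv f
        fset (ans * 2) hlftp0 hp0i hdv hnd hqgetD hqdrop' hf0 h0pre hfset (by omega)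
      -- the two freshly computed dp values agree
      have hXT : Int.ModEq pvMOD (ans * 2 - (Tsum dv (p0 + 1) - Tsum dv lft))
          (Tsum dv (pre.length + 1) - Tsum dv (p0 + 1)) := by
        have e4 : Int.ModEq pvMOD (ans * 2 - (Tsum dv (p0 + 1) - Tsum dv lft))
            (ans + (Tsum dv pre.length - Tsum dv lft) - (Tsum dv (p0 + 1) - Tsum dv lft)) := by
          rw [show ans * 2 - (Tsum dv (p0 + 1) - Tsum dv lft)
              = ans + ans - (Tsum dv (p0 + 1) - Tsum dv lft) from by ring]
          exact ((Int.ModEq.refl ans).add hwin).sub (Int.ModEq.refl _)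
        rw [show ans + (Tsum dv pre.length - Tsum dv lft) - (Tsum dv (p0 + 1) - Tsum dv lft)
            = Tsum dv pre.length + ans - Tsum dv (p0 + 1) from by ring] at e4
        rw [show Tsum dv (pre.length + 1) - Tsum dv (p0 + 1)
            = Tsum dv pre.length + ans - Tsum dv (p0 + 1) from by rw [hTi1]]
        exact e4
      have hec := (hSmod pre.length (le_refl _)).sub (hSmod p0 (by omega))
      have hansAB : PySem.Int.mod (ans * 2 - (Tsum dv (p0 + 1) - Tsum dv lft)) pvMOD
          = PySem.Int.mod (S.getD pre.length 0 - S.getD p0 0) pvMOD := by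
        rw [PySem.Int.mod_eq_emod_of_pos hM, PySem.Int.mod_eq_emod_of_pos hM]
        exact hXT.trans hec.symm
      -- invariant for the extended prefix
      have hnd2 : (pre.drop (p0 + 1)).Nodup := by
        have hdd : pre.drop (p0 + 1) = (pre.drop lft).drop (p0 + 1 - lft) := by
          rw [List.drop_drop]
          congr 1
          omega
        rw [hdd]
        exact (List.drop_sublist _ _).nodup hnd
      have hv2 : Int.ModEq pvMOD
          (PySem.Int.mod (ans * 2 - (Tsum dv (p0 + 1) - Tsum dv lft)) pvMOD)
          (Tsum dv (pre.length + 1) - Tsum dv (p0 + 1)) := by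
        rw [PySem.Int.mod_eq_emod_of_pos hM]
        exact (Int.emod_emod_of_dvd _ dvd_rfl).trans hXT
      have hfs2 : ∀ x : Int, x ∈ PySem.Set.add fset' f ↔
          x = 0 ∨ x ∈ (pre ++ [f]).drop (p0 + 1) := by
        intro x
        rw [PySem.Set.mem_add, hmem' x, List.drop_append_of_le_length (by omega),
          List.mem_append, List.mem_singleton]
        tauto
      have hq2 := queue_extend pre dv f
        (PySem.Int.mod (ans * 2 - (Tsum dv (p0 + 1) - Tsum dv lft)) pvMOD)
        (p0 + 1) (by omega) hdv
      have hInv2 := dpinv_extend pre dv S last (p0 + 1) f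
        (PySem.Int.mod (ans * 2 - (Tsum dv (p0 + 1) - Tsum dv lft)) pvMOD)
        (((dv.getD (p0 + 1) 0, 0) :: (List.range (pre.length - (p0 + 1))).map
            (fun k => (dv.getD (p0 + 1 + k + 1) 0, pre.getD (p0 + 1 + k) 0))) ++
          [(PySem.Int.mod (ans * 2 - (Tsum dv (p0 + 1) - Tsum dv lft)) pvMOD, f)])
        (PySem.Set.add fset' f) hdv hS hSmod hlastd (by omega) hv2 hnd2 hqdrop' hf0 hq2 hfs2
      have hfinal := ih (pre ++ [f])
        (dv ++ [PySem.Int.mod (ans * 2 - (Tsum dv (p0 + 1) - Tsum dv lft)) pvMOD])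
        (S ++ [PySem.Int.mod (S.getD pre.length 0 +
          PySem.Int.mod (ans * 2 - (Tsum dv (p0 + 1) - Tsum dv lft)) pvMOD) pvMOD])
        (PySem.Dict.insert last f ((pre.length : Int) + 1)) (p0 + 1) _ _ _
        h0pre2 h0suf' hInv2
      rw [hlen2] at hfinal
      rw [show (((p0 + 1 : Nat)) : Int) = ((q : Nat) : Int) from by omega]
        at hfinal
      rw [astep_eval_pos queue fset ans f hcontQ, hqlen2, hqueue, hwt, hb]
      dsimp only
      rw [← hansAB]
      exact hfinal
    · -- CASE B: f not in the window, the window just grows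
      have hncont : ¬ PySem.Set.contains fset f = true := by
        intro h
        rcases (hfset f).mp ((PySem.Set.contains_iff fset f).mp h) with h0 | hw
        · exact hf0 h0
        · exact hfw hw
      -- B side: the stored last position (if any) is ≤ lft
      have hple : PySem.Dict.getD last f 0 ≤ (lft : Int) := by
        cases hq : lastOcc pre f with
        | none =>
          have hx : PySem.Dict.getD last f 0 = 0 := by
            rw [PySem.Dict.getD_eq_get?_getD, hlastd f, hq]
            rfl
          rw [hx]
          exact Int.natCast_nonneg lft
        | some q =>
          obtain ⟨hq1, hqlen, hqget, hqdrop⟩ := lastOcc_spec pre f q hq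
          have hqlft : q ≤ lft := by
            by_contra hcon
            exact hfw (hqget ▸ getD_mem_drop pre lft (q - 1) (by omega) (by omega))
          have hx : PySem.Dict.getD last f 0 = ((q : Nat) : Int) := by
            rw [PySem.Dict.getD_eq_get?_getD, hlastd f, hq]
            rfl
          rw [hx]
          exact_mod_cast hqlft
      have hb := bstep_eval S last (lft : Int) ans (pre.length : Int)
        (PySem.Dict.getD last f 0) f rfl
      rw [if_neg (not_lt.mpr hple)] at hb
      rw [hii, PySem.List.pyGetD_natCast] at hb
      -- the freshly computed dp values agree
      have hC : Int.ModEq pvMOD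
          (if (lft : Int) > 0 then PySem.List.pyGetD S ((lft : Int) - 1) 0 else 0)
          (Tsum dv lft) := by
        by_cases hl0 : (lft : Int) > 0
        · have hlp : 1 ≤ lft := by exact_mod_cast hl0
          rw [if_pos hl0,
            show ((lft : Int) - 1) = (((lft - 1 : Nat)) : Int) from by push_cast [hlp]; ring,
            PySem.List.pyGetD_natCast]
          have := hSmod (lft - 1) (by omega)
          rwa [show lft - 1 + 1 = lft from by omega] at this
        · rw [if_neg hl0]
          have hl : lft = 0 := by omega
          subst hl
          rfl
      have hXT : Int.ModEq pvMOD (ans * 2)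
          (Tsum dv (pre.length + 1) - Tsum dv lft) := by
        have e4 : Int.ModEq pvMOD (ans * 2) (ans + (Tsum dv pre.length - Tsum dv lft)) := by
          rw [show ans * 2 = ans + ans from by ring]
          exact (Int.ModEq.refl ans).add hwin
        rw [show Tsum dv (pre.length + 1) - Tsum dv lft
            = ans + (Tsum dv pre.length - Tsum dv lft) from by rw [hTi1]; ring]
        exact e4
      have hansAB : PySem.Int.mod (ans * 2) pvMOD
          = PySem.Int.mod (S.getD pre.length 0 -
              (if (lft : Int) > 0 then PySem.List.pyGetD S ((lft : Int) - 1) 0 else 0))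
              pvMOD := by
        rw [PySem.Int.mod_eq_emod_of_pos hM, PySem.Int.mod_eq_emod_of_pos hM]
        exact hXT.trans ((hSmod pre.length (le_refl _)).sub hC).symm
      have hv2 : Int.ModEq pvMOD (PySem.Int.mod (ans * 2) pvMOD)
          (Tsum dv (pre.length + 1) - Tsum dv lft) := by
        rw [PySem.Int.mod_eq_emod_of_pos hM]
        exact (Int.emod_emod_of_dvd _ dvd_rfl).trans hXT
      have hfs2 : ∀ x : Int, x ∈ PySem.Set.add fset f ↔
          x = 0 ∨ x ∈ (pre ++ [f]).drop lft := by
        intro x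
        rw [PySem.Set.mem_add, hfset x, List.drop_append_of_le_length (by omega),
          List.mem_append, List.mem_singleton]
        tauto
      have hq2 : queue ++ [(PySem.Int.mod (ans * 2) pvMOD, f)]
          = ((dv ++ [PySem.Int.mod (ans * 2) pvMOD]).getD lft 0, 0) ::
            (List.range (pre.length + 1 - lft)).map
              (fun k => ((dv ++ [PySem.Int.mod (ans * 2) pvMOD]).getD (lft + k + 1) 0,
                (pre ++ [f]).getD (lft + k) 0)) := by
        rw [hqueue]
        exact queue_extend pre dv f (PySem.Int.mod (ans * 2) pvMOD) lft (by omega) hdv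
      have hInv2 := dpinv_extend pre dv S last lft f (PySem.Int.mod (ans * 2) pvMOD)
        (queue ++ [(PySem.Int.mod (ans * 2) pvMOD, f)])
        (PySem.Set.add fset f) hdv hS hSmod hlastd (by omega) hv2 hnd hfw hf0 hq2 hfs2
      have hfinal := ih (pre ++ [f]) (dv ++ [PySem.Int.mod (ans * 2) pvMOD])
        (S ++ [PySem.Int.mod (S.getD pre.length 0 + PySem.Int.mod (ans * 2) pvMOD) pvMOD])
        (PySem.Dict.insert last f ((pre.length : Int) + 1)) lft _ _ _
        h0pre2 h0suf' hInv2
      rw [hlen2] at hfinal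
      rw [astep_eval_neg queue fset ans f hncont, hb]
      rw [← hansAB]
      exact hfinal

-- ===== VERDICT (by name: the statement is the Claim_ definition above) =====
lemma bstep_init (f0 : Int) : bstep ([1], PySem.Dict.empty, 0, 1, 0) f0
    = ([1, 2], PySem.Dict.insert PySem.Dict.empty f0 1, 0, 1, 1) := by
  have h1 : PySem.Dict.getD (PySem.Dict.empty : PySem.Dict Int Int) f0 0 = 0 := by
    rw [PySem.Dict.getD_eq_get?_getD, PySem.Dict.get?_empty]
    rfl
  rw [bstep_eval _ _ _ _ _ 0 f0 h1]
  norm_num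
  exact ⟨by decide, by decide⟩

lemma dpinv_init (f0 : Int) (hf00 : f0 ≠ 0) :
    DPInv [f0] [1, 1] [1, 2] (PySem.Dict.insert PySem.Dict.empty f0 1) 0
      [(1, 0), (1, f0)] (PySem.Set.ofList [0, f0]) 1 := by
  refine ⟨rfl, rfl, ?_, rfl, ?_, by norm_num, ?_, ?_, ?_, ?_⟩
  · intro j hj
    simp only [List.length_cons, List.length_nil] at hj
    interval_cases j
    · decide
    · decide
  · simp only [List.length_cons, List.length_nil]
    decide
  · rfl
  · intro x
    rw [PySem.Set.mem_ofList]
    simp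
  · simp
  · intro g
    by_cases hg : g = f0
    · subst hg
      rw [PySem.Dict.get?_insert_self]
      simp [lastOcc]
    · rw [PySem.Dict.get?_insert_of_ne _ _ hg, PySem.Dict.get?_empty]
      simp [lastOcc, Ne.symm hg]

theorem solve_spec : Claim_equal_solve := by
  unfold Claim_equal_solve
  intro fs m hdom hpre
  obtain ⟨hne, h0⟩ := hpre
  show solve fs m = solve_alt fs m
  cases fs with
  | nil => exact absurd rfl hne
  | cons f0 rest =>
    have hf00 : f0 ≠ 0 := fun h => h0 (by simp [h])
    have h0rest : (0 : Int) ∉ rest := fun h => h0 (List.mem_cons_of_mem _ h)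
    have h0pre : (0 : Int) ∉ [f0] := by
      simp only [List.mem_singleton]
      exact fun h => hf00 h.symm
    have hmain := loop_eq rest [f0] [1, 1] [1, 2]
      (PySem.Dict.insert PySem.Dict.empty f0 1) 0 [(1, 0), (1, f0)]
      (PySem.Set.ofList [0, f0]) 1 h0pre h0rest (dpinv_init f0 hf00)
    simp only [List.length_cons, List.length_nil, Nat.cast_zero, Nat.zero_add,
      Nat.cast_one] at hmain
    unfold solve solve_alt
    rw [PySem.List.slice_from_one]
    rw [List.foldl_cons, bstep_init]
    have hg0 : PySem.List.pyGet? (f0 :: rest) 0 = some f0 := by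
      simp [PySem.List.pyGet?, PySem.List.pyIdx?]
    rw [hg0]
    exact hmain
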